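-- pv_equiv track=rewrite | github.com/skyg547/pythoncodingtest | Tests/buzbilltest/test3.py | countTeams
-- ===== SOURCE A (Python) =====
-- from itertools import combinations
--
-- def check(list, minLevel, maxLevel):
--     for i in list:
--         if i < minLevel:
--             return False
--         if i > maxLevel:
--             return False
--     return True
--
-- def countTeams(skills, minPlayers, minLevel, maxLevel):
--     # Write your code here
--     answercnt = 0
--     for i in range(minPlayers, len(skills) + 1):
--         templist = list(combinations(skills, i))
--         for j in templist:
--             if check(j, minLevel, maxLevel):
--                 answercnt += 1
--
--     return answercnt
-- ===== SOURCE B (Python) =====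
-- def countTeams(skills, minPlayers, minLevel, maxLevel):
--     k = 0
--     for s in skills:
--         if minLevel <= s <= maxLevel:
--             k += 1
--     total = 0
--     c = 1  # c == C(k, i) at the top of each iteration
--     for i in range(0, k + 1):
--         if i >= minPlayers:
--             total += c
--         c = c * (k - i) // (i + 1)
--     return total
-- ===== Notes on version B (the rewrite author's own statement) =====
-- stated objective: faster
-- what changed: Replaces the exhaustive enumeration of all combinations of every allowed size with a single count of in-range skills followed by a Pascal-style running-binomial sum of C(k,i) for i >= minPlayers.
import Mathlib
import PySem

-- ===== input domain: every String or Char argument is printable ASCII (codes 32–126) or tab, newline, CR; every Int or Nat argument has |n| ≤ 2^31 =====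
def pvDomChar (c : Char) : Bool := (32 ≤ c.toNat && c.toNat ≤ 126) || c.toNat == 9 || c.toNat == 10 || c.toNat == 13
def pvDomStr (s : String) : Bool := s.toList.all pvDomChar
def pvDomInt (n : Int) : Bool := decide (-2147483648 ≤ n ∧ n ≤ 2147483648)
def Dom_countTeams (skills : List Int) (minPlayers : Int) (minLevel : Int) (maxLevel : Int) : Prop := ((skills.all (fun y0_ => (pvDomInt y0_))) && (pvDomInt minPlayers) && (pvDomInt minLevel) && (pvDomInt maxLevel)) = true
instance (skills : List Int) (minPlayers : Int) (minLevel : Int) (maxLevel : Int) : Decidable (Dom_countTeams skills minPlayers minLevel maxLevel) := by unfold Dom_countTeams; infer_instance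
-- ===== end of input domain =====

-- B replaces A's exhaustive enumeration of all combinations by one in-range count k and a
-- running-binomial sum of C(k,i) for i ≥ minPlayers (objective: faster, asymptotic).

-- ===== PORT A =====
def check : List Int → Int → Int → Bool
  | [], _, _ => true
  | i :: rest, minLevel, maxLevel =>
    if i < minLevel then false
    else if i > maxLevel then false
    else check rest minLevel maxLevel

-- port of itertools.combinations(skills, i) (only the multiset of tuples matters here)
def combos : List Int → Nat → List (List Int)
  | _, 0 => [[]]
  | [], _ + 1 => []
  | x :: xs, n + 1 => ((combos xs n).map (fun c => x :: c)) ++ combos xs (n + 1)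

def countTeams (skills : List Int) (minPlayers : Int) (minLevel : Int) (maxLevel : Int) : Int :=
  (PySem.List.pyRange minPlayers ((skills.length : Int) + 1) 1).foldl
    (fun answercnt i =>
      (combos skills i.toNat).foldl
        (fun a j => if check j minLevel maxLevel then a + 1 else a) answercnt)
    0

-- ===== PORT B =====
def countTeams_alt (skills : List Int) (minPlayers : Int) (minLevel : Int) (maxLevel : Int) : Int :=
  let k : Int := skills.foldl (fun a s => if minLevel ≤ s ∧ s ≤ maxLevel then a + 1 else a) 0
  ((PySem.List.pyRange 0 (k + 1) 1).foldl
    (fun (st : Int × Int) i =>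
      ((if minPlayers ≤ i then st.1 + st.2 else st.1),
       PySem.Int.floordiv (st.2 * (k - i)) (i + 1)))
    (0, 1)).1

-- ===== PRECONDITION & SPEC =====
-- Pre_ excludes minPlayers < 0, where Python A raises ValueError (combinations with negative r).
def Pre_countTeams (skills : List Int) (minPlayers : Int) (minLevel : Int) (maxLevel : Int) : Prop :=
  0 ≤ minPlayers
instance (skills : List Int) (minPlayers : Int) (minLevel : Int) (maxLevel : Int) : Decidable (Pre_countTeams skills minPlayers minLevel maxLevel) := by unfold Pre_countTeams; infer_instance

def pvWitness_countTeams : List Int × Int × Int × Int := ([1, 5, 2], 2, 1, 3)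

def Spec_countTeams (skills : List Int) (minPlayers : Int) (minLevel : Int) (maxLevel : Int) (out : Int) : Prop := out = countTeams_alt skills minPlayers minLevel maxLevel
instance (skills : List Int) (minPlayers : Int) (minLevel : Int) (maxLevel : Int) (out : Int) : Decidable (Spec_countTeams skills minPlayers minLevel maxLevel out) := by unfold Spec_countTeams; infer_instance

-- ===== CLAIM (what is proved, stated in full; the proofs are below) =====
def Claim_equal_countTeams : Prop := ∀ (skills : List Int) (minPlayers : Int) (minLevel : Int) (maxLevel : Int), Dom_countTeams skills minPlayers minLevel maxLevel → Pre_countTeams skills minPlayers minLevel maxLevel → Spec_countTeams skills minPlayers minLevel maxLevel (countTeams skills minPlayers minLevel maxLevel)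
-- ===== LEMMAS AND PROOFS =====

-- the in-range predicate
lemma check_eq_all (lo hi : Int) (j : List Int) :
    check j lo hi = j.all (fun s => decide (lo ≤ s ∧ s ≤ hi)) := by
  induction j with
  | nil => rfl
  | cons x j ih =>
    simp only [check, List.all_cons, ih]
    split_ifs with h1 h2 <;> simp <;> omega

-- core counting fact: among the i-combinations of xs, the ones passing `check`
-- number C(countP in-range xs, i)
lemma countP_combos (lo hi : Int) (xs : List Int) : ∀ n : Nat,
    (combos xs n).countP (fun j => check j lo hi)
      = (xs.countP (fun s => decide (lo ≤ s ∧ s ≤ hi))).choose n := by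
  induction xs with
  | nil =>
    intro n
    cases n with
    | zero => simp [combos, check]
    | succ n => simp [combos, Nat.choose]
  | cons x xs ih =>
    intro n
    cases n with
    | zero => simp [combos, check]
    | succ n =>
      simp only [combos, List.countP_append, List.countP_map]
      have hx : ∀ j, check (x :: j) lo hi
          = ((decide (lo ≤ x ∧ x ≤ hi)) && check j lo hi) := fun j => by
        simp only [check_eq_all, List.all_cons]
      by_cases hp : (lo ≤ x ∧ x ≤ hi)
      · have h1 : List.countP ((fun j => check j lo hi) ∘ (fun c => x :: c)) (combos xs n)
            = List.countP (fun j => check j lo hi) (combos xs n) :=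
          List.countP_congr (fun j _ => by simp [Function.comp, hx j, hp])
        rw [h1, ih n, ih (n + 1), List.countP_cons]
        have hpx : (decide (lo ≤ x ∧ x ≤ hi)) = true := by simpa using hp
        rw [hpx]
        simp only [if_true]
        exact (Nat.choose_succ_succ _ _).symm
      · have h1 : List.countP ((fun j => check j lo hi) ∘ (fun c => x :: c)) (combos xs n) = 0 := by
          rw [List.countP_eq_zero]
          intro j _
          simp [Function.comp, hx j, hp]
        rw [h1, ih (n + 1), List.countP_cons]
        have hpx : (decide (lo ≤ x ∧ x ≤ hi)) = false := by simpa using hp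
        rw [hpx]
        simp

-- a counting foldl is countP
lemma foldl_count_if {α : Type} (q : α → Prop) [DecidablePred q] :
    ∀ (L : List α) (acc : Int),
      L.foldl (fun a j => if q j then a + 1 else a) acc
        = acc + (L.countP (fun j => decide (q j)) : Int) := by
  intro L
  induction L with
  | nil => intro acc; simp
  | cons x L ih =>
    intro acc
    by_cases h : q x <;> simp [List.countP_cons, h, ih] <;> push_cast <;> ring

-- a summing foldl is a mapped sum
lemma foldl_add_int (f : Int → Int) :
    ∀ (L : List Int) (s : Int),
      L.foldl (fun acc i => acc + f i) s = s + (L.map f).sum := by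
  intro L
  induction L with
  | nil => intro s; simp
  | cons x L ih => intro s; simp [ih]; ring

-- list-sum over pyRange = Finset.Ico sum
lemma sum_map_pyRange (f : Int → Int) (a b : Int) (ha : 0 ≤ a) :
    ((PySem.List.pyRange a b 1).map f).sum = ∑ i ∈ Finset.Ico a.toNat b.toNat, f i := by
  rw [PySem.List.pyRange_one]
  rw [Finset.sum_Ico_eq_sum_range]
  have hn : b.toNat - a.toNat = (b - a).toNat := by omega
  rw [hn]
  induction (b - a).toNat with
  | zero => simp
  | succ n ihn =>
    rw [List.range_succ, Finset.sum_range_succ]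
    simp only [List.map_append, List.sum_append, List.map_cons, List.map_nil, List.sum_cons,
      List.sum_nil]
    rw [ihn]
    have h2 : ((a.toNat + n : Nat) : Int) = a + (n : Int) := by push_cast; omega
    rw [h2]
    ring

-- extending the upper bound of a binomial Ico-sum past k changes nothing
lemma sum_ico_choose_ext (k m b b' : Nat) (hb : k < b) (hbb : b ≤ b') :
    ∑ i ∈ Finset.Ico m b, ((k.choose i : Nat) : Int)
      = ∑ i ∈ Finset.Ico m b', ((k.choose i : Nat) : Int) := by
  apply Finset.sum_subset
  · apply Finset.Ico_subset_Ico le_rfl hbb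
  · intro i hi hni
    simp only [Finset.mem_Ico] at hi hni
    have : k < i := by omega
    simp [Nat.choose_eq_zero_of_lt this]

-- B's running-binomial loop computes the Ico sum of binomials
lemma b_loop (k : Nat) (m : Int) : ∀ (d j : Nat) (t : Int), j + d = k + 1 →
    (((PySem.List.pyRange (j : Int) ((k : Int) + 1) 1).foldl
      (fun (st : Int × Int) i =>
        ((if m ≤ i then st.1 + st.2 else st.1),
         PySem.Int.floordiv (st.2 * ((k : Int) - i)) (i + 1)))
      (t, (k.choose j : Int))).1)
    = t + ∑ i ∈ Finset.Ico j (k + 1), (if m ≤ (i : Int) then (k.choose i : Int) else 0) := by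
  intro d
  induction d with
  | zero =>
    intro j t hj
    have h1 : ((k : Int) + 1) ≤ (j : Int) := by omega
    rw [PySem.List.pyRange_one_eq_nil h1]
    have : j = k + 1 := by omega
    simp [this]
  | succ d ihd =>
    intro j t hj
    have hjk : j ≤ k := by omega
    have h1 : (j : Int) < (k : Int) + 1 := by omega
    rw [PySem.List.pyRange_one_cons h1]
    simp only [List.foldl_cons]
    have hc : PySem.Int.floordiv ((k.choose j : Int) * ((k : Int) - (j : Int))) ((j : Int) + 1)
        = (k.choose (j + 1) : Int) := by
      have hkj : (k : Int) - (j : Int) = ((k - j : Nat) : Int) := by omega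
      have hmul : (k.choose j : Int) * ((k : Int) - (j : Int))
          = ((k.choose j * (k - j) : Nat) : Int) := by rw [hkj]; push_cast; ring
      have hj1 : (j : Int) + 1 = ((j + 1 : Nat) : Int) := by push_cast; ring
      rw [hmul, hj1, PySem.Int.floordiv_natCast]
      rw [← Nat.choose_succ_right_eq]
      simp [Nat.mul_div_cancel]
    have hsum : ∑ i ∈ Finset.Ico j (k + 1), (if m ≤ (i : Int) then (k.choose i : Int) else 0)
        = (if m ≤ (j : Int) then (k.choose j : Int) else 0)
          + ∑ i ∈ Finset.Ico (j + 1) (k + 1), (if m ≤ (i : Int) then (k.choose i : Int) else 0) := by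
      rw [Finset.sum_eq_sum_Ico_succ_bot (by omega)]
    by_cases hm : m ≤ (j : Int)
    · rw [hsum]
      simp only [hm, if_true, hc]
      have := ihd (j + 1) (t + (k.choose j : Int)) (by omega)
      push_cast at this ⊢
      rw [this]; ring
    · rw [hsum]
      simp only [hm, if_false, hc]
      have := ihd (j + 1) t (by omega)
      push_cast at this ⊢
      rw [this]; ring

-- characterisation of port B
lemma alt_eq_sum (skills : List Int) (m lo hi : Int) :
    countTeams_alt skills m lo hi
      = ∑ i ∈ Finset.Ico 0 ((skills.countP (fun s => decide (lo ≤ s ∧ s ≤ hi))) + 1),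
          (if m ≤ (i : Int) then ((skills.countP (fun s => decide (lo ≤ s ∧ s ≤ hi))).choose i : Int) else 0) := by
  unfold countTeams_alt
  set k := skills.countP (fun s => decide (lo ≤ s ∧ s ≤ hi)) with hk
  have hkInt : skills.foldl (fun a s => if lo ≤ s ∧ s ≤ hi then a + 1 else a) 0 = (k : Int) := by
    rw [foldl_count_if (fun s => lo ≤ s ∧ s ≤ hi) skills 0]; simp [hk]
  simp only [hkInt]
  have := b_loop k m (k + 1) 0 0 (by omega)
  simpa using this

-- characterisation of port A (needs 0 ≤ m)
lemma a_eq_sum (skills : List Int) (m lo hi : Int) (hm : 0 ≤ m) :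
    countTeams skills m lo hi
      = ∑ i ∈ Finset.Ico m.toNat (skills.length + 1),
          ((skills.countP (fun s => decide (lo ≤ s ∧ s ≤ hi))).choose i : Int) := by
  unfold countTeams
  set k := skills.countP (fun s => decide (lo ≤ s ∧ s ≤ hi)) with hk
  have hinner : ∀ (acc : Int) (i : Int),
      (combos skills i.toNat).foldl
        (fun a j => if check j lo hi then a + 1 else a) acc
      = acc + (k.choose i.toNat : Int) := by
    intro acc i
    rw [foldl_count_if (fun j => check j lo hi = true) (combos skills i.toNat) acc]
    have hdec : List.countP (fun j => decide (check j lo hi = true)) (combos skills i.toNat)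
        = List.countP (fun j => check j lo hi) (combos skills i.toNat) := by simp
    rw [hdec, countP_combos lo hi skills i.toNat]
  have hfold :
      (PySem.List.pyRange m ((skills.length : Int) + 1) 1).foldl
        (fun answercnt i =>
          (combos skills i.toNat).foldl
            (fun a j => if check j lo hi then a + 1 else a) answercnt) 0
      = (PySem.List.pyRange m ((skills.length : Int) + 1) 1).foldl
          (fun acc i => acc + (k.choose i.toNat : Int)) 0 := by
    congr 1; funext acc i; exact hinner acc i
  rw [hfold, foldl_add_int (fun i => (k.choose i.toNat : Int)),
    sum_map_pyRange (fun i => (k.choose i.toNat : Int)) m ((skills.length : Int) + 1) hm]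
  have hbt : ((skills.length : Int) + 1).toNat = skills.length + 1 := by omega
  rw [hbt, zero_add]
  apply Finset.sum_congr rfl
  intro i hi
  simp

-- ===== VERDICT (by name: the statement is the Claim_ definition above) =====
theorem countTeams_spec : Claim_equal_countTeams := by
  intro skills m lo hi _ hpre
  unfold Spec_countTeams
  unfold Pre_countTeams at hpre
  rw [a_eq_sum skills m lo hi hpre, alt_eq_sum skills m lo hi]
  set k := skills.countP (fun s => decide (lo ≤ s ∧ s ≤ hi)) with hkdef
  have hkle : k ≤ skills.length := List.countP_le_length
  -- turn the if-sum of B into an Ico sum starting at m.toNat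
  have hB : ∑ i ∈ Finset.Ico 0 (k + 1), (if m ≤ (i : Int) then (k.choose i : Int) else 0)
      = ∑ i ∈ Finset.Ico m.toNat (k + 1), (k.choose i : Int) := by
    rw [← Finset.sum_filter]
    apply Finset.sum_congr
    · ext i
      simp only [Finset.mem_filter, Finset.mem_Ico]
      omega
    · intros; rfl
  rw [hB]
  exact (sum_ico_choose_ext k m.toNat (k + 1) (skills.length + 1) (by omega) (by omega)).symm
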